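-- pv_equiv track=rewrite | github.com/SergioTheFirst/jurist | src/legaldesk/anonymizer/dict_detector.py | _find_context_positions
-- ===== SOURCE A (Python) =====
-- def _find_context_positions(
--     text_lower: str, context_words: frozenset[str]
-- ) -> list[int]:
--     """Вернуть список позиций, где встречаются контекстные слова."""
--     positions: list[int] = []
--     for word in context_words:
--         pos = 0
--         while True:
--             idx = text_lower.find(word, pos)
--             if idx == -1:
--                 break
--             positions.append(idx)
--             pos = idx + 1
--     return positions
-- ===== SOURCE B (Python) =====
-- def _find_context_positions(text_lower, context_words):
--     """Return positions where context words occur (overlapping matches included)."""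
--     return [
--         i
--         for word in context_words
--         for i in range(len(text_lower) + 1)
--         if text_lower.startswith(word, i)
--     ]
-- ===== Notes on version B (the rewrite author's own statement) =====
-- stated objective: simpler
-- what changed: Replaces A's per-word while/str.find resume loop with mutable position state by a single flat comprehension that tests text_lower.startswith(word, i) at every start position, emitting the same per-word increasing occurrence lists.
import Mathlib
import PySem

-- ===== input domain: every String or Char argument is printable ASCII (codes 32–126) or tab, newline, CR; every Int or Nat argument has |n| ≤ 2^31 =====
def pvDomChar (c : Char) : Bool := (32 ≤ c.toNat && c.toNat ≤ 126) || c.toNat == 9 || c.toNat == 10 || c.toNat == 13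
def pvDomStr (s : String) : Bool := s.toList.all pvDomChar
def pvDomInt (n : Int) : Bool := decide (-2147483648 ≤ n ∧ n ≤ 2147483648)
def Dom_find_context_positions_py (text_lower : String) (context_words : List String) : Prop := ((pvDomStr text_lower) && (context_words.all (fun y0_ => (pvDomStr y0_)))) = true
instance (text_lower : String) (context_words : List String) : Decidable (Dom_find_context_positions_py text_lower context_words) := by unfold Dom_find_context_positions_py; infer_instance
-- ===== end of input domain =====

-- B replaces A's per-word while/str.find resume loop by a flat comprehension testing
-- text_lower.startswith(word, i) at every start position (objective: simpler).

-- ===== PORT A =====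
-- A's inner 'while True: idx = text_lower.find(word, pos)' loop; fuel bounds the iteration
-- count (each found idx satisfies idx >= pos, so at most len(text)+2 iterations happen;
-- the fuel is a totality guard only, never reached on the call below).
def pvAFindLoop (cs w : List Char) : Nat → Nat → List Int
  | 0, _ => []
  | fuel + 1, pos =>
    if PySem.Chars.findFrom cs w (pos : Int) = -1 then []
    else PySem.Chars.findFrom cs w (pos : Int) ::
      pvAFindLoop cs w fuel ((PySem.Chars.findFrom cs w (pos : Int)).toNat + 1)

def find_context_positions_py (text_lower : String) (context_words : List String) : List Int :=
  context_words.foldl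
    (fun positions word =>
      positions ++ pvAFindLoop text_lower.toList word.toList (text_lower.toList.length + 2) 0)
    []

-- ===== PORT B =====
-- flat comprehension: for word in context_words, for i in range(len(text)+1),
-- keep i if text_lower.startswith(word, i); startswith(word, i) with 0 <= i is
-- exactly the slice text_lower[i:i+len(word)] == word
def find_context_positions_py_alt (text_lower : String) (context_words : List String) : List Int :=
  let cs := text_lower.toList
  context_words.foldl
    (fun out word =>
      (PySem.List.pyRange 0 ((cs.length : Int) + 1) 1).foldl
        (fun out i =>
          if PySem.List.slice cs (some i) (some (i + (word.toList.length : Int))) = word.toList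
          then out ++ [i] else out)
        out)
    []

-- ===== PRECONDITION & SPEC =====
def Spec_find_context_positions_py (text_lower : String) (context_words : List String) (out : List Int) : Prop := out = find_context_positions_py_alt text_lower context_words
instance (text_lower : String) (context_words : List String) (out : List Int) : Decidable (Spec_find_context_positions_py text_lower context_words out) := by unfold Spec_find_context_positions_py; infer_instance

-- ===== CLAIM (what is proved, stated in full; the proofs are below) =====
def Claim_equal_find_context_positions_py : Prop := ∀ (text_lower : String) (context_words : List String), Dom_find_context_positions_py text_lower context_words → Spec_find_context_positions_py text_lower context_words (find_context_positions_py text_lower context_words)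

-- ===== LEMMAS AND PROOFS =====

-- canonical per-word value: the occurrence positions >= pos of w in cs, in increasing order
def pvOccFrom (cs w : List Char) (pos : Nat) : List Int :=
  ((List.range (cs.length + 1)).filter (fun i => decide (pos ≤ i ∧ w <+: cs.drop i))).map
    (fun k : Nat => (k : Int))

theorem pv_infix_drop_iff (cs w : List Char) (pos : Nat) (hpos : pos ≤ cs.length) :
    w <:+: cs.drop pos ↔ ∃ i, pos ≤ i ∧ i ≤ cs.length ∧ w <+: cs.drop i := by
  constructor
  · intro h
    obtain ⟨t, hpre, hsuf⟩ := List.infix_iff_prefix_suffix.mp h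
    have hd := List.suffix_iff_eq_drop.mp hsuf
    refine ⟨pos + ((cs.drop pos).length - t.length), by omega, ?_, ?_⟩
    · have hlen : (cs.drop pos).length = cs.length - pos := List.length_drop
      omega
    · rw [← List.drop_drop, ← hd]; exact hpre
  · rintro ⟨i, h1, h2, h3⟩
    apply List.infix_iff_prefix_suffix.mpr
    refine ⟨cs.drop i, h3, ?_⟩
    have hi : cs.drop i = (cs.drop pos).drop (i - pos) := by
      rw [List.drop_drop]; congr 1; omega
    rw [hi]; exact List.drop_suffix _ _

theorem pv_filter_range_none (N pos : Nat) (P : Nat → Prop) [DecidablePred P]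
    (h : ∀ i, pos ≤ i → i < N → ¬ P i) :
    (List.range N).filter (fun i => decide (pos ≤ i ∧ P i)) = [] := by
  rw [List.filter_eq_nil_iff]
  intro a ha
  simp only [List.mem_range] at ha
  simp only [decide_eq_true_eq]
  rintro ⟨hx, hy⟩
  exact h a hx ha hy

theorem pv_filter_range_first (N pos r : Nat) (P : Nat → Prop) [DecidablePred P]
    (hrN : r < N) (hpr : pos ≤ r) (hP : P r)
    (hmin : ∀ i, pos ≤ i → i < r → ¬ P i) :
    (List.range N).filter (fun i => decide (pos ≤ i ∧ P i))
      = r :: (List.range N).filter (fun i => decide (r + 1 ≤ i ∧ P i)) := by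
  have hsplit : N = (r + 1) + (N - (r + 1)) := by omega
  have h1 : (List.range r).filter (fun i => decide (pos ≤ i ∧ P i)) = [] := by
    rw [List.filter_eq_nil_iff]
    intro a ha
    simp only [List.mem_range] at ha
    simp only [decide_eq_true_eq]
    rintro ⟨hx, hy⟩
    exact hmin a hx ha hy
  have h2 : (List.range r).filter (fun i => decide (r + 1 ≤ i ∧ P i)) = [] := by
    rw [List.filter_eq_nil_iff]
    intro a ha
    simp only [List.mem_range] at ha
    simp only [decide_eq_true_eq]
    rintro ⟨hx, _⟩
    omega
  have h3 : ∀ x ∈ List.map (fun y => (r + 1) + y) (List.range (N - (r + 1))),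
      (decide (pos ≤ x ∧ P x)) = (decide (r + 1 ≤ x ∧ P x)) := by
    intro x hx
    simp only [List.mem_map] at hx
    obtain ⟨y, _, rfl⟩ := hx
    have e1 : pos ≤ (r + 1) + y := by omega
    have e2 : r + 1 ≤ (r + 1) + y := by omega
    simp [e1, e2]
  rw [hsplit, List.range_add, List.range_succ, List.filter_append, List.filter_append,
      List.filter_append, List.filter_append, h1, h2, List.filter_congr h3]
  simp [hpr, hP]

theorem pv_findFrom_len_succ (cs w : List Char) :
    PySem.Chars.findFrom cs w ((cs.length + 1 : Nat) : Int) = -1 := by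
  simp [PySem.Chars.findFrom]
  rw [if_neg (show ¬(((cs.length : Int) + 1) < 0) by omega)]
  intro h
  exact absurd h (by omega)

theorem pv_aLoop_eq (cs w : List Char) :
    ∀ fuel pos, pos ≤ cs.length + 1 → cs.length + 2 - pos ≤ fuel →
      pvAFindLoop cs w fuel pos = pvOccFrom cs w pos := by
  intro fuel
  induction fuel with
  | zero => intro pos h1 h2; omega
  | succ fuel ih =>
    intro pos hpos hfuel
    rcases Nat.lt_or_ge pos (cs.length + 1) with hlt | hge
    · -- pos ≤ cs.length : the real search step
      have hpos' : pos ≤ cs.length := by omega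
      have hff := PySem.Chars.findFrom_natCast cs w pos hpos'
      by_cases h1 : PySem.Chars.find (cs.drop pos) w = -1
      · have hocc : pvOccFrom cs w pos = [] := by
          unfold pvOccFrom
          rw [pv_filter_range_none (cs.length + 1) pos (fun i => w <+: cs.drop i)
              (fun i hpi hiN hpre => (PySem.Chars.find_eq_neg_one_iff (cs.drop pos) w).mp h1
                ((pv_infix_drop_iff cs w pos hpos').mpr ⟨i, hpi, by omega, hpre⟩))]
          rfl
        simp only [pvAFindLoop]
        rw [hff, if_pos h1, if_pos rfl, hocc]
      · have hfz : PySem.Chars.findFrom (cs.drop pos) w (((0 : Nat) : Int)) ≠ -1 := by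
          simpa [PySem.Chars.findFrom_zero] using h1
        obtain ⟨hge0, hpref, hmin⟩ :=
          PySem.Chars.findFrom_natCast_spec (cs.drop pos) w 0 (Nat.zero_le _) hfz
        simp only [Nat.cast_zero, PySem.Chars.findFrom_zero] at hge0 hpref hmin
        set f := PySem.Chars.find (cs.drop pos) w with hfdef
        set r0 := pos + f.toNat with hr0
        have hdropj : ∀ j : Nat, (cs.drop pos).drop j = cs.drop (pos + j) := by
          intro j; rw [List.drop_drop]
        have hprefr : w <+: cs.drop r0 := by rw [← hdropj]; exact hpref
        have hminr : ∀ i, pos ≤ i → i < r0 → ¬ w <+: cs.drop i := by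
          intro i ha hb hc
          have hm := hmin (i - pos) (by omega) (by omega)
          rw [hdropj] at hm
          have he : pos + (i - pos) = i := by omega
          rw [he] at hm
          exact hm hc
        have hr0len : r0 ≤ cs.length := by
          rcases hwc : w with _ | ⟨c, t⟩
          · have hf0 : f.toNat = 0 := by
              by_contra hne
              exact hmin 0 (by omega) (by omega) (by simp [hwc])
            omega
          · by_contra hcn
            have hnil : cs.drop r0 = [] := List.drop_eq_nil_of_le (by omega)
            rw [hwc, hnil] at hprefr
            exact (by simp : (c :: t : List Char) ≠ []) (List.prefix_nil.mp hprefr)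
        have hidx : PySem.Chars.findFrom cs w (pos : Int) = (r0 : Int) := by
          rw [hff, if_neg h1, hr0]
          push_cast
          rw [Int.toNat_of_nonneg hge0]
        simp only [pvAFindLoop]
        rw [hidx, if_neg (show ¬((r0 : Int) = -1) by omega), Int.toNat_natCast,
            ih (r0 + 1) (by omega) (by omega)]
        unfold pvOccFrom
        rw [pv_filter_range_first (cs.length + 1) pos r0 (fun i => w <+: cs.drop i)
            (by omega) (by omega) hprefr hminr]
        simp
    · -- pos = cs.length + 1 : find past the end returns -1 at once
      have hp : pos = cs.length + 1 := by omega
      subst hp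
      simp only [pvAFindLoop]
      rw [pv_findFrom_len_succ, if_pos rfl]
      unfold pvOccFrom
      rw [pv_filter_range_none (cs.length + 1) (cs.length + 1) (fun i => w <+: cs.drop i)
          (fun i h1 h2 _ => by omega)]
      rfl

theorem pv_bword (cs w : List Char) (out : List Int) :
    (PySem.List.pyRange 0 ((cs.length : Int) + 1) 1).foldl
        (fun out i =>
          if PySem.List.slice cs (some i) (some (i + (w.length : Int))) = w
          then out ++ [i] else out)
        out
      = out ++ pvOccFrom cs w 0 := by
  rw [PySem.List.foldl_append_ite_eq_filter
        (fun i => PySem.List.slice cs (some i) (some (i + (w.length : Int))) = w)]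
  congr 1
  rw [show ((cs.length : Int) + 1) = ((cs.length + 1 : Nat) : Int) by push_cast; ring,
      PySem.List.pyRange_zero_natCast, List.filter_map]
  unfold pvOccFrom
  congr 1
  apply List.filter_congr
  intro i hi
  simp only [List.mem_range] at hi
  simp only [Function.comp_def]
  have hslice : PySem.List.slice cs (some ((i : Nat) : Int))
        (some (((i : Nat) : Int) + (w.length : Int)))
      = (cs.drop i).take w.length := by
    rw [show (((i : Nat) : Int) + (w.length : Int))
          = (((i + w.length : Nat)) : Int) by push_cast; ring,
        PySem.List.slice_natCast]
    congr 1
    omega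
  rw [hslice]
  apply decide_eq_decide.mpr
  constructor
  · intro h1
    exact ⟨Nat.zero_le i, List.prefix_iff_eq_take.mpr h1.symm⟩
  · rintro ⟨_, h2⟩
    exact (List.prefix_iff_eq_take.mp h2).symm

-- ===== VERDICT (by name: the statement is the Claim_ definition above) =====
theorem find_context_positions_py_spec : Claim_equal_find_context_positions_py := by
  intro text_lower context_words _
  unfold Spec_find_context_positions_py find_context_positions_py find_context_positions_py_alt
  apply PySem.List.foldl_congr_mem
  intro acc word _
  rw [pv_aLoop_eq text_lower.toList word.toList (text_lower.toList.length + 2) 0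
      (by omega) (by omega)]
  exact (pv_bword text_lower.toList word.toList acc).symm
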